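-- pv_equiv track=rewrite | github.com/noveroa/aileens_musing | musings/matrices.py | listMatrix
-- ===== SOURCE A (Python) =====
-- def listMatrix(matrix: list[list[int]] = [[3,7,8], [9,11,13], [15,16,17]]):
--     """
--     Given a matrix (list of lists), return the elements that are the minimum in their row and maximum in their column.
--     """
--
--     cols =  [[matrix[i][j] for i in range(len(matrix))] for j in range(len(matrix[0]))]
--     rows =  [matrix[i] for i in range(len(matrix))]
--
--     magics = []
--     for i in range(len(matrix)):
--         for j in range(len(matrix[0])):
--             if min(rows[i]) == max(cols[j]):
--                 magics.append(matrix[i][j])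
--     return magics
-- ===== SOURCE B (Python) =====
-- def listMatrix(matrix: list[list[int]] = [[3,7,8], [9,11,13], [15,16,17]]):
--     """
--     Given a matrix (list of lists), return the elements that are the minimum in their row and maximum in their column.
--     Precomputes each column's maximum once, then a single scan over the cells.
--     """
--     col_max = [max(row[j] for row in matrix) for j in range(len(matrix[0]))]
--     magics = []
--     for row in matrix:
--         if row:
--             rm = min(row)
--             for x, cm in zip(row, col_max):
--                 if rm == cm:
--                     magics.append(x)
--     return magics
-- ===== Notes on version B (the rewrite author's own statement) =====
-- stated objective: faster
-- what changed: A rebuilds cols/rows index lists and recomputes min(row) and max(col) for every cell; B precomputes each column maximum once and each row minimum once per row, then does a single scan over the cells, so the per-cell inner min/max scans disappear.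
import Mathlib
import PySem

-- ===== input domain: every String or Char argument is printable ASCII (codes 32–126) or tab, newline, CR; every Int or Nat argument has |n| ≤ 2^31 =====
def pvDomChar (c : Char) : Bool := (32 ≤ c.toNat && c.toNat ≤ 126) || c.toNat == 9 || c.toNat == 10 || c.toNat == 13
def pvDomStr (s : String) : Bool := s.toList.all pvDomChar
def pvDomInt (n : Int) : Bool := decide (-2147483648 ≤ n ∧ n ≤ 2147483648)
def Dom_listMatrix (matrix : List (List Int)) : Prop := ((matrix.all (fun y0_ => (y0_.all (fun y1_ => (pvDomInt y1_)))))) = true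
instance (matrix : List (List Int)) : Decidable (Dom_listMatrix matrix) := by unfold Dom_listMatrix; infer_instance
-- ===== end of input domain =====

-- B precomputes each column maximum once and each row minimum once per row, then a single
-- scan over the cells: O(n·m) instead of A's re-computed min/max per cell.

-- ===== PORT A =====
def listMatrix (matrix : List (List Int)) : List Int :=
  let n := matrix.length
  let m := (matrix.headD []).length
  let cols := (List.range m).map (fun j => (List.range n).map (fun i => (matrix.getD i []).getD j 0))
  let rows := (List.range n).map (fun i => matrix.getD i [])
  (List.range n).foldl (fun magics i =>
    (List.range m).foldl (fun magics j =>
      if PySem.List.min? (rows.getD i []) (fun y => y) = PySem.List.max? (cols.getD j []) (fun y => y)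
      then magics ++ [(matrix.getD i []).getD j 0] else magics) magics) []

-- ===== PORT B =====
def listMatrix_alt (matrix : List (List Int)) : List Int :=
  let m := (matrix.headD []).length
  let colMax := (List.range m).map (fun j => PySem.List.max? (matrix.map (fun s => s.getD j 0)) (fun y => y))
  matrix.foldl (fun magics row =>
    if row.isEmpty then magics
    else
      (row.zip colMax).foldl (fun magics p =>
        if PySem.List.min? row (fun y => y) = p.2 then magics ++ [p.1] else magics) magics) []

-- ===== PRECONDITION & SPEC =====
-- Pre_ excludes exactly the inputs where A raises IndexError: the empty matrix (matrix[0])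
-- and matrices with a row shorter than the first row (matrix[i][j] while building the columns);
-- B raises IndexError on those inputs too.
def Pre_listMatrix (matrix : List (List Int)) : Prop :=
  matrix ≠ [] ∧ ∀ r ∈ matrix, (matrix.headD []).length ≤ r.length
instance (matrix : List (List Int)) : Decidable (Pre_listMatrix matrix) := by unfold Pre_listMatrix; infer_instance

def pvWitness_listMatrix : List (List Int) := [[3,7,8], [9,11,13], [15,16,17]]

def Spec_listMatrix (matrix : List (List Int)) (out : List Int) : Prop := out = listMatrix_alt matrix
instance (matrix : List (List Int)) (out : List Int) : Decidable (Spec_listMatrix matrix out) := by unfold Spec_listMatrix; infer_instance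

-- ===== CLAIM (what is proved, stated in full; the proofs are below) =====
def Claim_equal_listMatrix : Prop := ∀ (matrix : List (List Int)), Dom_listMatrix matrix → Pre_listMatrix matrix → Spec_listMatrix matrix (listMatrix matrix)

-- ===== LEMMAS AND PROOFS =====

-- proof-side canonical form: row minima against column maxima over the first row's width
def colfun (matrix : List (List Int)) (j : Nat) : List Int := matrix.map (fun s => s.getD j 0)

def canon (matrix : List (List Int)) (m : Nat) : List Int :=
  matrix.foldl (fun acc row => (List.range m).foldl (fun acc j =>
    if PySem.List.min? row (fun y => y) = PySem.List.max? (colfun matrix j) (fun y => y)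
    then acc ++ [row.getD j 0] else acc) acc) []

lemma map_range_getD {α β : Type} (f : α → β) (d : α) :
    ∀ (xs : List α), (List.range xs.length).map (fun i => f (xs.getD i d)) = xs.map f := by
  intro xs
  induction xs with
  | nil => rfl
  | cons x t ih =>
    simp only [List.length_cons, List.range_succ_eq_map, List.map_cons, List.map_map]
    simp only [List.getD_cons_zero, Function.comp_def, List.getD_cons_succ]
    exact congrArg (f x :: ·) ih

lemma foldl_range_getD {α β : Type} (G : β → α → β) (d : α) :
    ∀ (xs : List α) (acc : β), (List.range xs.length).foldl (fun acc i => G acc (xs.getD i d)) acc = xs.foldl G acc := by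
  intro xs
  induction xs with
  | nil => intro acc; rfl
  | cons x t ih =>
    intro acc
    simp only [List.length_cons, List.range_succ_eq_map, List.foldl_cons, List.foldl_map]
    simp only [List.getD_cons_zero, List.getD_cons_succ]
    exact ih (G acc x)

lemma inner_eq (rm : Option Int) :
    ∀ (cmx : List (Option Int)) (row : List Int) (acc : List Int), cmx.length ≤ row.length →
      (row.zip cmx).foldl (fun acc p => if rm = p.2 then acc ++ [p.1] else acc) acc
      = (List.range cmx.length).foldl (fun acc j => if rm = cmx.getD j none then acc ++ [row.getD j 0] else acc) acc := by
  intro cmx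
  induction cmx with
  | nil => intro row acc _; simp
  | cons c cs ih =>
    intro row acc h
    match row with
    | [] => simp at h
    | x :: xs =>
      simp only [List.zip_cons_cons, List.foldl_cons, List.length_cons, List.range_succ_eq_map,
        List.foldl_map, List.getD_cons_zero, List.getD_cons_succ]
      exact ih xs _ (by simpa using h)

-- ===== VERDICT (by name: the statement is the Claim_ definition above) =====
theorem listMatrix_spec : Claim_equal_listMatrix := by
  intro matrix _ hpre
  obtain ⟨hne, hlen⟩ := hpre
  rcases matrix with _ | ⟨r0, rs⟩
  · exact absurd rfl hne
  have hlen' : ∀ r ∈ r0 :: rs, r0.length ≤ r.length := by simpa using hlen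
  show listMatrix (r0 :: rs) = listMatrix_alt (r0 :: rs)
  have hA : listMatrix (r0 :: rs) = canon (r0 :: rs) r0.length := by
    simp only [listMatrix, List.headD_cons]
    have step1 : (List.range (r0 :: rs).length).foldl (fun magics i =>
        (List.range r0.length).foldl (fun magics j =>
          if PySem.List.min? (((List.range (r0 :: rs).length).map (fun i => (r0 :: rs).getD i [])).getD i []) (fun y => y)
             = PySem.List.max? (((List.range r0.length).map (fun j => (List.range (r0 :: rs).length).map (fun i => ((r0 :: rs).getD i []).getD j 0))).getD j []) (fun y => y)
          then magics ++ [((r0 :: rs).getD i []).getD j 0] else magics) magics) []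
      = (List.range (r0 :: rs).length).foldl (fun magics i =>
        (List.range r0.length).foldl (fun magics j =>
          if PySem.List.min? ((r0 :: rs).getD i []) (fun y => y)
             = PySem.List.max? (colfun (r0 :: rs) j) (fun y => y)
          then magics ++ [((r0 :: rs).getD i []).getD j 0] else magics) magics) [] := by
      apply PySem.List.foldl_congr_mem
      intro acc i hi
      apply PySem.List.foldl_congr_mem
      intro acc' j hj
      rw [PySem.List.getD_map_range _ _ _ _ (List.mem_range.mp hi),
          PySem.List.getD_map_range _ _ _ _ (List.mem_range.mp hj),
          map_range_getD (fun s => s.getD j 0) [] (r0 :: rs)]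
      rfl
    exact step1.trans (foldl_range_getD (fun acc row => (List.range r0.length).foldl (fun acc j =>
      if PySem.List.min? row (fun y => y) = PySem.List.max? (colfun (r0 :: rs) j) (fun y => y)
      then acc ++ [row.getD j 0] else acc) acc) [] (r0 :: rs) [])
  have hB : listMatrix_alt (r0 :: rs) = canon (r0 :: rs) r0.length := by
    simp only [listMatrix_alt, List.headD_cons]
    have hcm : ((List.range r0.length).map (fun j => PySem.List.max? ((r0 :: rs).map (fun s => s.getD j 0)) (fun y => y))).length = r0.length := by
      simp
    apply PySem.List.foldl_congr_mem
    intro acc row hr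
    by_cases hrow : row.isEmpty
    · have h0 : r0.length = 0 := by
        have hr' := hlen' row hr
        rw [List.isEmpty_iff.mp hrow] at hr'; simpa using hr'
      rw [List.isEmpty_iff.mp hrow, h0]; simp
    · simp only [hrow]
      rw [inner_eq (PySem.List.min? row (fun y => y)) _ row acc (by
        rw [hcm]; exact hlen' row hr)]
      rw [hcm]
      apply PySem.List.foldl_congr_mem
      intro acc' j hj
      rw [PySem.List.getD_map_range _ _ _ _ (List.mem_range.mp hj)]
      rfl
  rw [hA, hB]
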